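-- pv_equiv track=rewrite | github.com/domingogallardo/x-liked-tweets-exporter | download_liked_tweets.py | _split_image_urls
-- ===== SOURCE A (Python) =====
-- from typing import List, Optional, Sequence, Set, Tuple
--
-- def _split_image_urls(image_urls: List[str]) -> Tuple[Optional[str], List[str]]:
--     avatar = None
--     media: List[str] = []
--     for url in image_urls:
--         if avatar is None and "profile_images" in url:
--             avatar = url
--             continue
--         media.append(url)
--     return avatar, media
-- ===== SOURCE B (Python) =====
-- from typing import List, Optional, Tuple
--
-- def _split_image_urls(image_urls: List[str]) -> Tuple[Optional[str], List[str]]: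
--     hit = next(((i, u) for i, u in enumerate(image_urls) if "profile_images" in u), None)
--     if hit is None:
--         return None, list(image_urls)
--     i, u = hit
--     return u, image_urls[:i] + image_urls[i + 1:]
-- ===== Notes on version B (the rewrite author's own statement) =====
-- stated objective: idiomatic
-- what changed: Replaces the single append-as-you-go accumulation loop by a search phase (first index/url with 'profile_images') followed by a slice phase that concatenates the list around the hit.
import Mathlib
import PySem

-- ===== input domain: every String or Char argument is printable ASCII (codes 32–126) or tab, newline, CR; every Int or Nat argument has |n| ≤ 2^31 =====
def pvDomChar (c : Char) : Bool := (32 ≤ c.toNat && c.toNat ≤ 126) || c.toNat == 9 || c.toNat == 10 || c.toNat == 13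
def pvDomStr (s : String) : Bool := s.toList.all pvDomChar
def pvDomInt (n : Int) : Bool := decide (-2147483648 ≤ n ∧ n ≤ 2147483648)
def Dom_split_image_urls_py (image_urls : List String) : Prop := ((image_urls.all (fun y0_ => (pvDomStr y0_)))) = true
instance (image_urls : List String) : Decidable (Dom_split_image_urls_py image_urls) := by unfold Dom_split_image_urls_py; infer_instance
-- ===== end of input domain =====

-- B replaces A's single append-as-you-go loop by a search-then-slice decomposition (idiomatic; same O(n) cost).

-- ===== PORT A =====
-- the for-loop of A: state (avatar, media), branch order as in the Python
def pvALoop : List String → Option String × List String → Option String × List String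
  | [], st => st
  | url :: rest, (avatar, media) =>
    if avatar = none ∧ PySem.Str.isIn "profile_images" url then
      pvALoop rest (some url, media)
    else
      pvALoop rest (avatar, media ++ [url])

def split_image_urls_py (image_urls : List String) : Option String × List String :=
  pvALoop image_urls (none, [])

-- ===== PORT B =====
-- the generator-with-next search phase of B: first (index, url) whose url contains "profile_images"
def pvFindHit : Nat → List String → Option (Nat × String)
  | _, [] => none
  | i, u :: rest =>
    if PySem.Str.isIn "profile_images" u then some (i, u) else pvFindHit (i + 1) rest

def split_image_urls_py_alt (image_urls : List String) : Option String × List String :=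
  match pvFindHit 0 image_urls with
  | none => (none, image_urls)
  | some (i, u) => (some u, image_urls.take i ++ image_urls.drop (i + 1))

-- ===== PRECONDITION & SPEC =====
def Spec_split_image_urls_py (image_urls : List String) (out : Option String × List String) : Prop := out = split_image_urls_py_alt image_urls
instance (image_urls : List String) (out : Option String × List String) : Decidable (Spec_split_image_urls_py image_urls out) := by unfold Spec_split_image_urls_py; infer_instance

-- ===== CLAIM =====
def Claim_equal_split_image_urls_py : Prop := ∀ (image_urls : List String), Dom_split_image_urls_py image_urls → Spec_split_image_urls_py image_urls (split_image_urls_py image_urls)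

-- ===== LEMMAS AND PROOFS =====
theorem pvALoop_some (xs : List String) (a : String) (media : List String) :
    pvALoop xs (some a, media) = (some a, media ++ xs) := by
  induction xs generalizing media with
  | nil => simp [pvALoop]
  | cons u rest ih => simp [pvALoop, ih]

theorem pvFindHit_shift (xs : List String) (k : Nat) :
    pvFindHit k xs = (pvFindHit 0 xs).map (fun p => (p.1 + k, p.2)) := by
  induction xs generalizing k with
  | nil => simp [pvFindHit]
  | cons u rest ih =>
    by_cases h : PySem.Chars.isIn ['p', 'r', 'o', 'f', 'i', 'l', 'e', '_', 'i', 'm', 'a', 'g', 'e', 's'] u.toList = true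
    · simp [pvFindHit, h]
    · rw [show pvFindHit k (u :: rest) = pvFindHit (k + 1) rest by simp [pvFindHit, h],
        show pvFindHit 0 (u :: rest) = pvFindHit 1 rest by simp [pvFindHit, h],
        ih (k + 1), ih 1]
      cases pvFindHit 0 rest with
      | none => rfl
      | some p => simp; omega

theorem pvMain (xs media : List String) :
    pvALoop xs (none, media) =
      match pvFindHit 0 xs with
      | none => (none, media ++ xs)
      | some (i, u) => (some u, media ++ (xs.take i ++ xs.drop (i + 1))) := by
  induction xs generalizing media with
  | nil => simp [pvALoop, pvFindHit]
  | cons u rest ih =>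
    by_cases h : PySem.Chars.isIn ['p', 'r', 'o', 'f', 'i', 'l', 'e', '_', 'i', 'm', 'a', 'g', 'e', 's'] u.toList = true
    · simp [pvALoop, pvFindHit, h, pvALoop_some]
    · rw [show pvALoop (u :: rest) (none, media) = pvALoop rest (none, media ++ [u]) by
        simp [pvALoop, h]]
      rw [ih (media ++ [u])]
      rw [show pvFindHit 0 (u :: rest) = pvFindHit 1 rest by simp [pvFindHit, h],
        pvFindHit_shift rest 1]
      cases hr : pvFindHit 0 rest with
      | none => simp
      | some p =>
        cases p with
        | mk i v => simp [List.take_succ_cons, List.drop_succ_cons]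

-- ===== VERDICT =====
theorem split_image_urls_py_spec : Claim_equal_split_image_urls_py := by
  intro xs _
  unfold Spec_split_image_urls_py split_image_urls_py split_image_urls_py_alt
  rw [pvMain xs []]
  cases pvFindHit 0 xs with
  | none => simp
  | some p => cases p; simp
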